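-- pv_equiv track=rewrite | github.com/cikitraque13/sistemamaestro | backend/app/services/ai_analysis_decision.py | _pick_by_precedence
-- ===== SOURCE A (Python) =====
-- from typing import Any, Dict, Iterable, List, Optional, Tuple
--
-- def _pick_by_precedence(
--     labels: Iterable[str],
--     precedence_order: Iterable[str],
-- ) -> Optional[str]:
--     """
--     Devuelve la primera etiqueta presente según precedencia.
--     """
--     label_set = set(labels)
--     for label in precedence_order:
--         if label in label_set:
--             return label
--     return None
-- ===== SOURCE B (Python) =====
-- def _pick_by_precedence(labels, precedence_order):
--     pos = {}
--     for i, label in enumerate(precedence_order):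
--         if label not in pos:
--             pos[label] = i
--     best = None  # (index, label) with the smallest index seen so far
--     for label in labels:
--         i = pos.get(label)
--         if i is not None and (best is None or i < best[0]):
--             best = (i, label)
--     return best[1] if best is not None else None
-- ===== Notes on version B (the rewrite author's own statement) =====
-- stated objective: alternative
-- what changed: Instead of scanning precedence_order against a set of labels, B builds a first-index table of precedence_order once and scans labels tracking the label with the smallest precedence index.
import Mathlib
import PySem

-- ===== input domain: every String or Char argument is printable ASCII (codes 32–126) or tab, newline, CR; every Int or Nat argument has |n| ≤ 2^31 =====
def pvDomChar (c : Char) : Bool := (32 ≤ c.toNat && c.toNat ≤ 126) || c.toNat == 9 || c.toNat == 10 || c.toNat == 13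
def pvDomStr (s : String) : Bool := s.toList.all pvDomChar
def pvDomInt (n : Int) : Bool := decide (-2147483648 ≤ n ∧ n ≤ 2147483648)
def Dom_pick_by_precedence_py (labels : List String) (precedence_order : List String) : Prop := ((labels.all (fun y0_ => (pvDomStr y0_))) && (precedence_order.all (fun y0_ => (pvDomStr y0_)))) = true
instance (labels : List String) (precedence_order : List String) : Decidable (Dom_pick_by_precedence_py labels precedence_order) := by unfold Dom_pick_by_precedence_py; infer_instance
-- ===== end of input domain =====

-- B replaces A's scan of precedence_order over a label set by a first-index table of
-- precedence_order plus a minimum-index scan of labels (alternative decomposition, same cost).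

-- ===== PORT A =====
def pickA_loop (label_set : PySem.Set String) : List String → Option String
  | [] => none
  | l :: rest => if PySem.Set.contains label_set l then some l else pickA_loop label_set rest

def pick_by_precedence_py (labels : List String) (precedence_order : List String) : Option String :=
  let label_set := PySem.Set.ofList labels
  pickA_loop label_set precedence_order

-- ===== PORT B =====
-- pos = {}; for i, label in enumerate(precedence_order): if label not in pos: pos[label] = i
def pvPos (precedence_order : List String) : PySem.Dict String Int :=
  (PySem.List.enumerate precedence_order).foldl
    (fun d p => if d.contains p.2 then d else d.insert p.2 p.1) PySem.Dict.empty

-- one iteration of B's second loop: i = pos.get(label); keep the pair with the smaller index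
def pvStep (pos : PySem.Dict String Int) (best : Option (Int × String)) (label : String) :
    Option (Int × String) :=
  match pos.get? label with
  | none => best
  | some i =>
    match best with
    | none => some (i, label)
    | some p => if i < p.1 then some (i, label) else best

def pick_by_precedence_py_alt (labels : List String) (precedence_order : List String) : Option String :=
  (labels.foldl (pvStep (pvPos precedence_order)) none).map (·.2)

-- ===== PRECONDITION & SPEC =====
def Spec_pick_by_precedence_py (labels : List String) (precedence_order : List String) (out : Option String) : Prop := out = pick_by_precedence_py_alt labels precedence_order
instance (labels : List String) (precedence_order : List String) (out : Option String) : Decidable (Spec_pick_by_precedence_py labels precedence_order out) := by unfold Spec_pick_by_precedence_py; infer_instance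

-- ===== CLAIM (what is proved, stated in full; the proofs are below) =====
def Claim_equal_pick_by_precedence_py : Prop := ∀ (labels : List String) (precedence_order : List String), Dom_pick_by_precedence_py labels precedence_order → Spec_pick_by_precedence_py labels precedence_order (pick_by_precedence_py labels precedence_order)

-- ===== LEMMAS AND PROOFS =====

-- first index of l in a list (proof-side specification of the pos table)
def pvFidx (l : String) : List String → Option Nat
  | [] => none
  | x :: rest => if x = l then some 0 else (pvFidx l rest).map (· + 1)

theorem pvFidx_eq_some_iff (l : String) (po : List String) (n : Nat) :
    pvFidx l po = some n ↔ po[n]? = some l ∧ ∀ m, m < n → po[m]? ≠ some l := by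
  induction po generalizing n with
  | nil => simp [pvFidx]
  | cons x rest ih =>
    simp only [pvFidx]
    by_cases hx : x = l
    · subst hx
      rw [if_pos rfl]
      constructor
      · rintro h
        injection h with h; subst h
        exact ⟨by simp, fun (m : Nat) hm => absurd hm (Nat.not_lt_zero m)⟩
      · rintro ⟨hget, hmin⟩
        cases n with
        | zero => rfl
        | succ k => exact absurd (by simp) (hmin 0 (Nat.succ_pos k))
    · simp only [if_neg hx]
      cases n with
      | zero =>
        simp only [List.getElem?_cons_zero]
        constructor
        · rintro h
          rcases Option.map_eq_some_iff.mp h with ⟨j, -, hj⟩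
          omega
        · rintro ⟨hget, -⟩
          injection hget with hget; exact absurd hget hx
      | succ k =>
        constructor
        · rintro h
          rcases Option.map_eq_some_iff.mp h with ⟨m, hm, hmk⟩
          have hmke : m = k := by omega
          rw [hmke] at hm
          rcases (ih k).mp hm with ⟨hget, hmin⟩
          refine ⟨by simpa using hget, ?_⟩
          rintro m hmlt
          cases m with
          | zero => simp only [List.getElem?_cons_zero]; intro hc; injection hc with hc; exact hx hc
          | succ j => simpa using hmin j (by omega)
        · rintro ⟨hget, hmin⟩
          have h1 : pvFidx l rest = some k := by
            refine (ih k).mpr ⟨by simpa using hget, ?_⟩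
            intro m hmlt
            simpa using hmin (m + 1) (by omega)
          simp [h1]

theorem pvFidx_eq_none_iff (l : String) (po : List String) :
    pvFidx l po = none ↔ l ∉ po := by
  induction po with
  | nil => simp [pvFidx]
  | cons x rest ih =>
    simp only [pvFidx]
    by_cases hx : x = l
    · subst hx; simp
    · simp [if_neg hx, ih, Ne.symm hx]

-- the pos table holds the first index of each label in precedence_order
theorem pvPos_aux (l : String) (po : List String) :
    ∀ (s : Int) (d : PySem.Dict String Int),
      ((PySem.List.enumerate po s).foldl
        (fun d p => if d.contains p.2 then d else d.insert p.2 p.1) d).get? l =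
      if d.contains l then d.get? l else (pvFidx l po).map (fun n : Nat => s + (n : Int)) := by
  induction po with
  | nil =>
    intro s d
    rw [PySem.List.enumerate_nil]
    by_cases hl : d.contains l
    · simp [hl]
    · have hnone : d.get? l = none := by
        rw [PySem.Dict.get?_eq_none_iff_contains]
        simpa using hl
      simp [hl, pvFidx, hnone]
  | cons x rest ih =>
    intro s d
    rw [PySem.List.enumerate_cons, List.foldl_cons]
    by_cases hc : d.contains x
    · rw [if_pos hc, ih (s + 1) d]
      by_cases hx : x = l
      · subst hx
        simp [hc]
      · simp only [pvFidx, if_neg hx]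
        by_cases hl : d.contains l
        · simp [hl]
        · simp only [hl]
          cases h : pvFidx l rest with
          | none => simp
          | some k => simp; ring
    · rw [if_neg hc, ih (s + 1) (d.insert x s)]
      by_cases hx : x = l
      · subst hx
        have h1 : (d.insert x s).contains x = true := by
          simp
        rw [if_pos h1, PySem.Dict.get?_insert_self]
        have h2 : d.contains x = false := by simpa using hc
        simp [h2, pvFidx]
      · have hne : l ≠ x := fun h => hx h.symm
        have h1 : (d.insert x s).contains l = d.contains l := by
          rw [PySem.Dict.contains_insert]
          simp [beq_eq_false_iff_ne.mpr hne]
        rw [h1, PySem.Dict.get?_insert_of_ne d s hne]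
        simp only [pvFidx, if_neg hx]
        by_cases hl : d.contains l
        · simp [hl]
        · simp only [hl]
          cases h : pvFidx l rest with
          | none => simp
          | some k => simp; ring

theorem pvPos_get (po : List String) (l : String) :
    (pvPos po).get? l = (pvFidx l po).map (fun n : Nat => (n : Int)) := by
  rw [pvPos, show PySem.List.enumerate po = PySem.List.enumerate po 0 from rfl, pvPos_aux]
  simp

-- characterizations of A's loop
theorem pickA_none (S : PySem.Set String) (po : List String)
    (h : pickA_loop S po = none) : ∀ x ∈ po, x ∉ S := by
  induction po with
  | nil => simp
  | cons x rest ih =>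
    rw [pickA_loop] at h
    by_cases hc : PySem.Set.contains S x = true
    · rw [if_pos (by simpa using hc)] at h
      exact absurd h (by simp)
    · rw [if_neg (by simpa using hc)] at h
      intro y hy
      rcases List.mem_cons.mp hy with hy | hy
      · subst hy
        intro hmem
        exact hc ((PySem.Set.contains_iff S y).mpr hmem)
      · exact ih h y hy

theorem pickA_some (S : PySem.Set String) (po : List String) (a : String)
    (h : pickA_loop S po = some a) :
    ∃ n : Nat, po[n]? = some a ∧ a ∈ S ∧
      ∀ m : Nat, m < n → ∀ y, po[m]? = some y → y ∉ S := by
  induction po with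
  | nil => simp [pickA_loop] at h
  | cons x rest ih =>
    rw [pickA_loop] at h
    by_cases hc : PySem.Set.contains S x = true
    · rw [if_pos (by simpa using hc)] at h
      injection h with h; subst h
      exact ⟨0, by simp, (PySem.Set.contains_iff S x).mp hc,
        fun (m : Nat) hm => absurd hm (Nat.not_lt_zero m)⟩
    · rw [if_neg (by simpa using hc)] at h
      rcases ih h with ⟨n, hget, ha, hmin⟩
      refine ⟨n + 1, by simpa using hget, ha, ?_⟩
      intro m hm y hy
      cases m with
      | zero =>
        simp only [List.getElem?_cons_zero] at hy
        injection hy with hy; subst hy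
        intro hmem
        exact hc ((PySem.Set.contains_iff S x).mpr hmem)
      | succ j => exact hmin j (by omega) y (by simpa using hy)

-- B's second loop keeps none when no label is in the table
theorem fold_none (pos : PySem.Dict String Int) (xs : List String)
    (h : ∀ l ∈ xs, pos.get? l = none) : xs.foldl (pvStep pos) none = none := by
  induction xs with
  | nil => rfl
  | cons x rest ih =>
    rw [List.foldl_cons, pvStep, h x (by simp)]
    exact ih (fun l hl => h l (by simp [hl]))

-- B's second loop reaches the pair q of the overall minimal index
theorem fold_min (pos : PySem.Dict String Int) (q : Int × String)
    (hq : pos.get? q.2 = some q.1) :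
    ∀ (xs : List String) (b : Option (Int × String)),
      (q.2 ∈ xs ∨ b = some q) →
      (∀ l ∈ xs, ∀ i, pos.get? l = some i → q.1 ≤ i ∧ (i = q.1 → l = q.2)) →
      (b = none ∨ ∃ i l, b = some (i, l) ∧ q.1 ≤ i ∧ (i = q.1 → (i, l) = q)) →
      xs.foldl (pvStep pos) b = some q := by
  obtain ⟨qi, ql⟩ := q
  simp only at hq ⊢
  intro xs
  induction xs with
  | nil =>
    rintro b hin hall hb
    rcases hin with h | h
    · simp at h
    · simpa using h
  | cons x rest ih =>
    rintro b hin hall hb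
    rw [List.foldl_cons]
    have hallrest : ∀ l ∈ rest, ∀ i, pos.get? l = some i → qi ≤ i ∧ (i = qi → l = ql) :=
      fun l hl => hall l (List.mem_cons_of_mem x hl)
    cases hget : pos.get? x with
    | none =>
      have hstep : pvStep pos b x = b := by cases b <;> simp [pvStep, hget]
      rw [hstep]
      refine ih b ?_ hallrest hb
      rcases hin with hin | hin
      · rcases List.mem_cons.mp hin with hx | hx
        · rw [hx] at hq; rw [hq] at hget; exact absurd hget (by simp)
        · exact Or.inl hx
      · exact Or.inr hin
    | some i =>
      have hxi := hall x (List.mem_cons_self) i hget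
      refine ih (pvStep pos b x) ?_ hallrest ?_
      · -- q.2 ∈ rest ∨ step result = some q
        rcases hin with hin | hin
        · rcases List.mem_cons.mp hin with hx | hx
          · right
            have hiq : i = qi := by rw [hx] at hq; rw [hq] at hget; injection hget with h; omega
            have hxq : x = ql := hxi.2 hiq
            rcases hb with rfl | ⟨j, l, rfl, hj1, hj2⟩
            · have hs : pvStep pos none x = some (i, x) := by simp [pvStep, hget]
              rw [hs, hiq, hxq]
            · by_cases hlt : i < j
              · have hs : pvStep pos (some (j, l)) x = some (i, x) := by
                  simp [pvStep, hget, hlt]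
                rw [hs, hiq, hxq]
              · have hje : j = qi := by omega
                have hs : pvStep pos (some (j, l)) x = some (j, l) := by
                  simp [pvStep, hget, hlt]
                rw [hs, hj2 hje]
          · exact Or.inl hx
        · subst hin
          right
          have hnlt : ¬ i < qi := by have := hxi.1; omega
          simp [pvStep, hget, hnlt]
      · -- invariant for the step result
        rcases hb with rfl | ⟨j, l, rfl, hj1, hj2⟩
        · exact Or.inr ⟨i, x, by simp [pvStep, hget], hxi.1,
            fun h => by simp [h, hxi.2 h]⟩
        · by_cases hlt : i < j
          · exact Or.inr ⟨i, x, by simp [pvStep, hget, hlt], hxi.1,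
              fun h => by simp [h, hxi.2 h]⟩
          · exact Or.inr ⟨j, l, by simp [pvStep, hget, hlt], hj1, hj2⟩

-- ===== VERDICT (by name: the statement is the Claim_ definition above) =====
theorem pick_by_precedence_py_spec : Claim_equal_pick_by_precedence_py := by
  intro labels po _
  unfold Spec_pick_by_precedence_py pick_by_precedence_py pick_by_precedence_py_alt
  cases hA : pickA_loop (PySem.Set.ofList labels) po with
  | none =>
    have hmem := pickA_none _ _ hA
    have hz : ∀ l ∈ labels, (pvPos po).get? l = none := by
      intro l hl
      rw [pvPos_get]
      have hfx : pvFidx l po = none := by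
        rw [pvFidx_eq_none_iff]
        intro hlp
        exact hmem l hlp ((PySem.Set.mem_ofList labels l).mpr hl)
      simp [hfx]
    rw [fold_none _ _ hz]
    rfl
  | some a =>
    rcases pickA_some _ _ _ hA with ⟨n, hget, ha, hmin⟩
    have haL : a ∈ labels := (PySem.Set.mem_ofList labels a).mp ha
    have hq : (pvPos po).get? a = some (n : Int) := by
      rw [pvPos_get]
      have hfx : pvFidx a po = some n := by
        rw [pvFidx_eq_some_iff]
        exact ⟨hget, fun m hm hc => hmin m hm a hc ha⟩
      simp [hfx]
    have hall : ∀ l ∈ labels, ∀ i, (pvPos po).get? l = some i →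
        ((n : Int), a).1 ≤ i ∧ (i = ((n : Int), a).1 → l = ((n : Int), a).2) := by
      intro l hl i hi
      rw [pvPos_get] at hi
      rcases Option.map_eq_some_iff.mp hi with ⟨m, hm, hmi⟩
      rcases (pvFidx_eq_some_iff _ _ _).mp hm with ⟨hgl, -⟩
      have hnm : n ≤ m := by
        by_contra hcon
        exact hmin m (by omega) l hgl ((PySem.Set.mem_ofList labels l).mpr hl)
      refine ⟨by simp only; omega, ?_⟩
      intro hieq
      simp only at hieq
      have hmn : m = n := by omega
      subst hmn
      rw [hget] at hgl
      injection hgl with hgl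
      exact hgl.symm
    rw [fold_min (pvPos po) ((n : Int), a) hq labels none (Or.inl haL) hall (Or.inl rfl)]
    rfl
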